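-- pv_equiv track=rewrite | github.com/iyarzaks/scheduling_with_petri_nets | RCPSP_modeling/rcpsp_base.py | calc_cumulative_resources
-- ===== SOURCE A (Python) =====
-- def calc_cumulative_resources(resource_over_time):
--     # Get all the times in sorted order
--     times = sorted(resource_over_time.keys())
--     cumulative_resource_usage = {}
--
--     # Initialize cumulative sums to zero for all resources
--     total_resources = {}
--
--     # Traverse backwards to accumulate the resource needs
--     for time in reversed(times):
--         if time not in cumulative_resource_usage:
--             cumulative_resource_usage[time] = {}
--
--         for resource, amount in resource_over_time.get(time, {}).items():
--             # Add the current resource amount to the cumulative sum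
--             total_resources[resource] = total_resources.get(resource, 0) + amount
--
--         # Store the cumulative resources at this time point
--         cumulative_resource_usage[time] = total_resources.copy()
--
--     return cumulative_resource_usage
-- ===== SOURCE B (Python) =====
-- def calc_cumulative_resources(resource_over_time):
--     # For every time point, rebuild its suffix snapshot from scratch by
--     # scanning the (descending-sorted) times down to it; no running accumulator, no .copy().
--     times_desc = sorted(resource_over_time, reverse=True)
--     result = {}
--     for i, t in enumerate(times_desc):
--         snapshot = {}
--         for s in times_desc[:i + 1]:
--             for resource, amount in resource_over_time[s].items():
--                 snapshot[resource] = snapshot.get(resource, 0) + amount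
--         result[t] = snapshot
--     return result
-- ===== Notes on version B (the rewrite author's own statement) =====
-- stated objective: alternative
-- what changed: Replaces A's single backward sweep with a shared running accumulator (and its per-time .copy()) by an independent recomputation: for each time t it rebuilds the suffix snapshot from scratch by scanning the descending-sorted times down to t.
import Mathlib
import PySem

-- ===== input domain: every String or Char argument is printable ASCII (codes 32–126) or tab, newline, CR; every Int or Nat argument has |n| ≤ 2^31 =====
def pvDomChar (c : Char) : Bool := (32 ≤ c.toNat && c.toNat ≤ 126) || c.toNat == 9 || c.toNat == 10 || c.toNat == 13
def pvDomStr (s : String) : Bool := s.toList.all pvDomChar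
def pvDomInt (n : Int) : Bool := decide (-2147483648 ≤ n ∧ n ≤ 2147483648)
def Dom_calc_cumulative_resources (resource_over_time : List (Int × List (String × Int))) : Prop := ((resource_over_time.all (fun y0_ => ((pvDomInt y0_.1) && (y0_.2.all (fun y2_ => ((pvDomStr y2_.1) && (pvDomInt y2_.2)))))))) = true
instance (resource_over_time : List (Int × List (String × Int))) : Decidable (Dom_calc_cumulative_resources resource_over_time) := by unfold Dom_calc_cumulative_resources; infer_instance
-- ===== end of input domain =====

-- ===== PORT A =====
-- B recomputes each suffix snapshot independently instead of A's running accumulator + .copy(); objective: alternative decomposition.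
-- Shared input decode: the dict[int, dict[str, int]] argument arrives as an association list.
def pvToDict (rot : List (Int × List (String × Int))) : PySem.Dict Int (PySem.Dict String Int) :=
  PySem.Dict.ofList (rot.map (fun p => (p.1, PySem.Dict.ofList p.2)))

-- 'total[resource] = total.get(resource, 0) + amount' (identical inner statement in A and B)
def pvAddRes (tot : PySem.Dict String Int) (rv : String × Int) : PySem.Dict String Int :=
  tot.insert rv.1 (tot.getD rv.1 0 + rv.2)

-- one time point's resources added into an accumulator (A: d.get(time, {}); B: d[time], same value since time is a key)
def pvAccTime (d : PySem.Dict Int (PySem.Dict String Int)) (tot : PySem.Dict String Int) (time : Int) : PySem.Dict String Int :=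
  (d.getD time PySem.Dict.empty).items.foldl pvAddRes tot

def calc_cumulative_resources (resource_over_time : List (Int × List (String × Int))) : List (Int × List (String × Int)) :=
  let d := pvToDict resource_over_time
  let times := PySem.List.sorted d.keys (fun x => x) false
  let st := times.reverse.foldl
    (fun (st : PySem.Dict Int (PySem.Dict String Int) × PySem.Dict String Int) time =>
      let cum := if st.1.contains time then st.1 else st.1.insert time PySem.Dict.empty
      let total := pvAccTime d st.2 time
      (cum.insert time total, total))
    (PySem.Dict.empty, PySem.Dict.empty)
  st.1.items.map (fun p => (p.1, p.2.items))

-- ===== PORT B =====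
def calc_cumulative_resources_alt (resource_over_time : List (Int × List (String × Int))) : List (Int × List (String × Int)) :=
  let d := pvToDict resource_over_time
  let timesDesc := PySem.List.sorted d.keys (fun x => x) true
  let result := (PySem.List.enumerate timesDesc).foldl
    (fun (res : PySem.Dict Int (PySem.Dict String Int)) it =>
      res.insert it.2
        ((PySem.List.slice timesDesc none (some (it.1 + 1))).foldl (pvAccTime d) PySem.Dict.empty))
    PySem.Dict.empty
  result.items.map (fun p => (p.1, p.2.items))

-- ===== PRECONDITION & SPEC =====
def Spec_calc_cumulative_resources (resource_over_time : List (Int × List (String × Int))) (out : List (Int × List (String × Int))) : Prop := out = calc_cumulative_resources_alt resource_over_time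
instance (resource_over_time : List (Int × List (String × Int))) (out : List (Int × List (String × Int))) : Decidable (Spec_calc_cumulative_resources resource_over_time out) := by unfold Spec_calc_cumulative_resources; infer_instance

-- ===== CLAIM (what is proved, stated in full; the proofs are below) =====
def Claim_equal_calc_cumulative_resources : Prop := ∀ (resource_over_time : List (Int × List (String × Int))), Dom_calc_cumulative_resources resource_over_time → Spec_calc_cumulative_resources resource_over_time (calc_cumulative_resources resource_over_time)

-- ===== LEMMAS AND PROOFS =====

-- the list of (time, suffix-total dict) snapshots, scanning a descending time list
def pvSnaps (d : PySem.Dict Int (PySem.Dict String Int)) (tot : PySem.Dict String Int) : List Int → List (Int × PySem.Dict String Int)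
  | [] => []
  | t :: rest => (t, pvAccTime d tot t) :: pvSnaps d (pvAccTime d tot t) rest

lemma pvSorted_desc (xs : List Int) (h : xs.Nodup) :
    PySem.List.sorted xs (fun x => x) true = (PySem.List.sorted xs (fun x => x) false).reverse := by
  apply PySem.List.sorted_rev_eq_of_perm_of_pairwise_gt
  · exact (List.reverse_perm _).trans (PySem.List.sorted_perm xs (fun x => x) false)
  · rw [List.pairwise_reverse]
    have hle := PySem.List.sorted_pairwise xs (fun x => x)
    have hnd : (PySem.List.sorted xs (fun x => x) false).Nodup :=
      (PySem.List.sorted_perm xs (fun x => x) false).nodup_iff.mpr h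
    exact (hle.and hnd).imp (fun hab => lt_of_le_of_ne hab.1 hab.2)

lemma pvA_loop (d : PySem.Dict Int (PySem.Dict String Int)) (L : List Int) (hnd : L.Nodup)
    (cum : PySem.Dict Int (PySem.Dict String Int)) (tot : PySem.Dict String Int)
    (hfresh : ∀ t ∈ L, cum.contains t = false) :
    (L.foldl
      (fun (st : PySem.Dict Int (PySem.Dict String Int) × PySem.Dict String Int) time =>
        let cum := if st.1.contains time then st.1 else st.1.insert time PySem.Dict.empty
        let total := pvAccTime d st.2 time
        (cum.insert time total, total)) (cum, tot)).1.items
    = cum.items ++ (pvSnaps d tot L).map (fun p => (p.1, p.2)) := by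
  induction L generalizing cum tot with
  | nil => simp [pvSnaps]
  | cons t rest ih =>
    have hct : cum.contains t = false := hfresh t (by simp)
    have hstep : (if cum.contains t then cum else cum.insert t PySem.Dict.empty).insert t (pvAccTime d tot t)
        = cum.insert t (pvAccTime d tot t) := by
      rw [hct]; simp [PySem.Dict.insert_insert_self]
    simp only [List.foldl_cons, hstep]
    rw [ih (hnd.of_cons)
      (cum.insert t (pvAccTime d tot t)) (pvAccTime d tot t)
      (by
        intro x hx
        rw [PySem.Dict.contains_insert]
        have hxt : x ≠ t := by
          intro hcontra; exact (List.nodup_cons.mp hnd).1 (hcontra ▸ hx)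
        simp [hxt, hfresh x (List.mem_cons_of_mem _ hx)])]
    rw [PySem.Dict.items_insert_of_not_contains cum _ hct]
    simp [pvSnaps]

lemma pvB_snaps (d : PySem.Dict Int (PySem.Dict String Int)) (L : List Int) :
    ∀ (acc : List Int),
    (PySem.List.enumerate L (acc.length : Int)).map
      (fun it => (it.2, (((acc ++ L).take (it.1 + 1).toNat).foldl (pvAccTime d) PySem.Dict.empty)))
    = pvSnaps d (acc.foldl (pvAccTime d) PySem.Dict.empty) L := by
  induction L with
  | nil => intro acc; simp [pvSnaps, PySem.List.enumerate]
  | cons t rest ih =>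
    intro acc
    rw [PySem.List.enumerate_cons, List.map_cons]
    have htake : ((acc ++ t :: rest).take ((((acc ++ [t]).length : Nat) : Int)).toNat) = acc ++ [t] := by
      have h1 : ((((acc ++ [t]).length : Nat) : Int)).toNat = acc.length + 1 := by simp
      rw [h1, List.take_append]
      simp
    have hcast : (acc.length : Int) + 1 = ((acc ++ [t]).length : Int) := by
      simp
    have htail := ih (acc ++ [t])
    rw [List.append_assoc] at htail
    simp only [List.singleton_append] at htail
    rw [hcast, htail, htake]
    simp only [pvSnaps, List.foldl_append, List.foldl_cons, List.foldl_nil]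

lemma pvMain (rot : List (Int × List (String × Int))) :
    calc_cumulative_resources rot = calc_cumulative_resources_alt rot := by
  unfold calc_cumulative_resources calc_cumulative_resources_alt
  set d := pvToDict rot with hd
  have hknd : d.keys.Nodup := PySem.Dict.nodup_keys_ofList _
  have hdesc := pvSorted_desc d.keys hknd
  have hLnd : (PySem.List.sorted d.keys (fun x => x) true).Nodup :=
    (PySem.List.sorted_perm d.keys (fun x => x) true).nodup_iff.mpr hknd
  set L := PySem.List.sorted d.keys (fun x => x) true with hL
  dsimp only
  rw [← hdesc]
  -- A side
  rw [pvA_loop d L hLnd PySem.Dict.empty PySem.Dict.empty (by intro t _; exact PySem.Dict.contains_empty t)]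
  -- B side: the insert loop over fresh distinct keys appends
  rw [PySem.Dict.items_foldl_insert_fresh (PySem.List.enumerate L)
        (fun it => it.2)
        (fun it => ((PySem.List.slice L none (some (it.1 + 1))).foldl (pvAccTime d) PySem.Dict.empty))
        PySem.Dict.empty
        (by intro a _; exact PySem.Dict.contains_empty _)
        (by rw [PySem.List.map_snd_enumerate]; exact hLnd)]
  -- slices of a descending prefix are takes
  have hslice : (PySem.List.enumerate L).map
      (fun it => ((it.2 : Int), (PySem.List.slice L none (some (it.1 + 1))).foldl (pvAccTime d) PySem.Dict.empty))
      = (PySem.List.enumerate L).map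
      (fun it => (it.2, (L.take (it.1 + 1).toNat).foldl (pvAccTime d) PySem.Dict.empty)) := by
    apply List.map_congr_left
    intro it hit
    obtain ⟨k, hk, rfl⟩ := (PySem.List.mem_enumerate_iff L 0 it).mp hit
    rw [PySem.List.slice_to L (by omega)]
  have hb := pvB_snaps d L []
  simp only [List.nil_append, List.length_nil, Nat.cast_zero, List.foldl_nil] at hb
  simp [hslice, hb]

-- ===== VERDICT (by name: the statement is the Claim_ definition above) =====
theorem calc_cumulative_resources_spec : Claim_equal_calc_cumulative_resources := by
  intro rot _
  exact pvMain rot
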